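-- pv_equiv track=rewrite | github.com/Bazs/graph_slam | utils/measurement_model.py | compress_correspondences
-- ===== SOURCE A (Python) =====
-- from collections import namedtuple, OrderedDict
-- from typing import List
--
-- def compress_correspondences(correspondences: List[List[int]]) -> List[List[int]]:
--     """
--     Maps the given correspondence indices to a new set of indices, which start from zero (in order of appearance in the
--     original correspondence lists), and are tightly increasing. NOTE: also modifies the input list!
--
--     >>> compress_correspondences([[5, 8], [5, 9], [8, 9], [9, 5, 8]])
--     [[0, 1], [0, 2], [1, 2], [2, 0, 1]]
--
--     :param correspondences: list of correspondence lists for each state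
--     :return compressed correspondences
--     """
--     flat_correspondences = [correspondence for correspondences_for_state in correspondences for correspondence in
--                             correspondences_for_state]
--
--     original_correspondence_indices = list(OrderedDict.fromkeys(flat_correspondences))
--
--     original_to_target = {original_correspondence_index: index for index, original_correspondence_index in
--                           enumerate(original_correspondence_indices)}
--
--     for index, original_correspondences_for_state in enumerate(correspondences):
--         correspondences[index] = [original_to_target[original_correspondence] for original_correspondence in
--                                   original_correspondences_for_state]
--
--     return correspondences
-- ===== SOURCE B (Python) =====
-- def compress_correspondences(correspondences):
--     """Single online pass: assign the next compact index at first appearance."""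
--     mapping = {}
--     for index, correspondences_for_state in enumerate(correspondences):
--         new_row = []
--         for original in correspondences_for_state:
--             target = mapping.get(original)
--             if target is None:
--                 target = len(mapping)
--                 mapping[original] = target
--             new_row.append(target)
--         correspondences[index] = new_row
--     return correspondences
-- ===== Notes on version B (the rewrite author's own statement) =====
-- stated objective: simpler
-- what changed: Replaced the three-pass structure (flatten all lists, dedup via OrderedDict.fromkeys, build an index dict, then re-map every list) by one online pass that assigns len(mapping) to each index on its first appearance.
import Mathlib
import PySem

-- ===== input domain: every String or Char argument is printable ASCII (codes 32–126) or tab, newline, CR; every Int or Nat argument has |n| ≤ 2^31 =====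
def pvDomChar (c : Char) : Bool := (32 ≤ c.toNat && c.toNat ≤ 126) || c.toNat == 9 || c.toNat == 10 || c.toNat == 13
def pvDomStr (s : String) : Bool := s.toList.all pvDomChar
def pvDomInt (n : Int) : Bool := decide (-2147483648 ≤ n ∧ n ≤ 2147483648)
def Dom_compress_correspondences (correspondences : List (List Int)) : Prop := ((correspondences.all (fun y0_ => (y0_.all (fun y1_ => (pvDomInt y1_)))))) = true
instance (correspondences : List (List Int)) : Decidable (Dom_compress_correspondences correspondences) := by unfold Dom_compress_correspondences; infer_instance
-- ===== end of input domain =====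

-- B replaces A's multi-pass structure (flatten, dedup, index dict, re-map) by one online pass
-- assigning the next compact index at first appearance (objective: simpler). Both Pythons also
-- mutate the input list in place; the equivalence proved here is about the RETURN value only.

-- ===== PORT A =====
-- Python's `original_to_target[c]` raises KeyError only on a missing key, which never happens here
-- (every looked-up element occurs in the flattened list, hence is a dict key): getD _ 0 is exact.
def compress_correspondences (correspondences : List (List Int)) : List (List Int) :=
  let flat_correspondences := correspondences.flatten
  let original_correspondence_indices := PySem.List.dedup flat_correspondences
  let original_to_target : PySem.Dict Int Int :=
    (PySem.List.enumerate original_correspondence_indices 0).foldl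
      (fun d p => d.insert p.2 p.1) PySem.Dict.empty
  correspondences.map (fun original_correspondences_for_state =>
    original_correspondences_for_state.map (fun c => original_to_target.getD c 0))

-- ===== PORT B =====
def pvAltElem (acc : PySem.Dict Int Int × List Int) (original : Int) :
    PySem.Dict Int Int × List Int :=
  match acc.1.get? original with
  | some target => (acc.1, acc.2 ++ [target])
  | none => (acc.1.insert original (acc.1.size : Int), acc.2 ++ [(acc.1.size : Int)])

def compress_correspondences_alt (correspondences : List (List Int)) : List (List Int) :=
  (correspondences.foldl
    (fun (acc : PySem.Dict Int Int × List (List Int)) row =>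
      let r := row.foldl pvAltElem (acc.1, ([] : List Int))
      (r.1, acc.2 ++ [r.2]))
    (PySem.Dict.empty, [])).2

-- ===== PRECONDITION & SPEC =====
def Spec_compress_correspondences (correspondences : List (List Int)) (out : List (List Int)) : Prop := out = compress_correspondences_alt correspondences
instance (correspondences : List (List Int)) (out : List (List Int)) : Decidable (Spec_compress_correspondences correspondences out) := by unfold Spec_compress_correspondences; infer_instance

-- ===== CLAIM (what is proved, stated in full; the proofs are below) =====
def Claim_equal_compress_correspondences : Prop := ∀ (correspondences : List (List Int)), Dom_compress_correspondences correspondences → Spec_compress_correspondences correspondences (compress_correspondences correspondences)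

-- ===== LEMMAS AND PROOFS =====

-- the dict A builds from an enumerated key list, generalized over start index and seed dict
def pvEnumDict (l : List Int) (s : Int) (d : PySem.Dict Int Int) : PySem.Dict Int Int :=
  (PySem.List.enumerate l s).foldl (fun d p => d.insert p.2 p.1) d

-- the compact index of x: its position in the first-appearance dedup list (0 if absent; unused then)
def pvIdxZ (l : List Int) (x : Int) : Int :=
  match PySem.List.index? l x with
  | some k => (k : Int)
  | none => 0

-- B's dict state after consuming the elements of p
def pvM (p : List Int) : PySem.Dict Int Int :=
  pvEnumDict (PySem.Set.ofList p) 0 PySem.Dict.empty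

lemma pvEnumDict_get? (l : List Int) (hl : l.Nodup) (s : Int) (d : PySem.Dict Int Int) (x : Int) :
    (pvEnumDict l s d).get? x =
      match PySem.List.index? l x with
      | some k => some (s + k)
      | none => d.get? x := by
  induction l generalizing s d with
  | nil => simp [pvEnumDict, PySem.List.enumerate_nil]
  | cons a t ih =>
    have hstep : pvEnumDict (a :: t) s d = pvEnumDict t (s + 1) (d.insert a s) := by
      simp [pvEnumDict, PySem.List.enumerate_cons]
    rw [hstep, ih hl.of_cons]
    by_cases hx : x = a
    · subst hx
      have hnx : PySem.List.index? t x = none :=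
        (PySem.List.index?_eq_none_iff t x).mpr (by simpa using (List.nodup_cons.mp hl).1)
      rw [hnx, PySem.List.index?_cons_self]
      simp [PySem.Dict.get?_insert_self]
    · rw [PySem.List.index?_cons_of_ne t (fun h => hx h.symm)]
      cases hix : PySem.List.index? t x with
      | none => simp [PySem.Dict.get?_insert_of_ne d s hx]
      | some k => simp; omega

lemma pvEnumDict_size (l : List Int) (s : Int) (d : PySem.Dict Int Int)
    (hl : l.Nodup) (hd : ∀ x ∈ l, d.get? x = none) :
    (pvEnumDict l s d).size = d.size + l.length := by
  induction l generalizing s d with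
  | nil => simp [pvEnumDict, PySem.List.enumerate_nil]
  | cons a t ih =>
    have hstep : pvEnumDict (a :: t) s d = pvEnumDict t (s + 1) (d.insert a s) := by
      simp [pvEnumDict, PySem.List.enumerate_cons]
    have hca : d.contains a = false :=
      (PySem.Dict.get?_eq_none_iff_contains d a).mp (hd a (by simp))
    rw [hstep, ih (s + 1) (d.insert a s) hl.of_cons]
    · rw [PySem.Dict.size_insert]
      simp [hca]
      omega
    · intro x hx
      have hxa : x ≠ a := by
        rintro rfl; exact (List.nodup_cons.mp hl).1 hx
      rw [PySem.Dict.get?_insert_of_ne d s hxa]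
      exact hd x (by simp [hx])

-- the compact index of an element of l is unaffected by appending more data
lemma pvIdx_prefix (l t : List Int) (x : Int) (hx : x ∈ l) :
    PySem.List.index? (PySem.Set.ofList (l ++ t)) x = PySem.List.index? (PySem.Set.ofList l) x := by
  rw [PySem.Set.ofList_append, PySem.Set.update_eq_append_filter]
  exact PySem.List.index?_append_of_mem _ ((PySem.Set.mem_ofList _ _).mpr hx)

lemma pvIdxZ_prefix (l t : List Int) (x : Int) (hx : x ∈ l) :
    pvIdxZ (PySem.Set.ofList (l ++ t)) x = pvIdxZ (PySem.Set.ofList l) x := by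
  unfold pvIdxZ; rw [pvIdx_prefix l t x hx]

lemma pvM_get? (p : List Int) (x : Int) :
    (pvM p).get? x =
      match PySem.List.index? (PySem.Set.ofList p) x with
      | some k => some ((k : Int))
      | none => none := by
  rw [pvM, pvEnumDict_get? _ (PySem.Set.nodup_ofList p) 0 PySem.Dict.empty x]
  cases PySem.List.index? (PySem.Set.ofList p) x with
  | none => simp [pysem]
  | some k => simp

lemma pvM_size (p : List Int) : (pvM p).size = (PySem.Set.ofList p).length := by
  rw [pvM, pvEnumDict_size _ 0 _ (PySem.Set.nodup_ofList p) (by intro x _; simp [pysem])]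
  simp [PySem.Dict.size, PySem.Dict.empty]

lemma pvM_snoc_mem (p : List Int) (x : Int) (hx : x ∈ p) : pvM (p ++ [x]) = pvM p := by
  unfold pvM
  rw [PySem.Set.ofList_append_singleton, PySem.Set.add_of_mem ((PySem.Set.mem_ofList _ _).mpr hx)]

lemma pvM_snoc_not_mem (p : List Int) (x : Int) (hx : x ∉ p) :
    pvM (p ++ [x]) = (pvM p).insert x (((PySem.Set.ofList p).length : Int)) := by
  unfold pvM
  rw [PySem.Set.ofList_append_singleton,
      PySem.Set.add_of_not_mem (fun h => hx ((PySem.Set.mem_ofList _ _).mp h))]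
  unfold pvEnumDict
  rw [PySem.List.enumerate_append, List.foldl_append]
  simp [PySem.List.enumerate_cons, PySem.List.enumerate_nil]

lemma pvRow (row : List Int) (p : List Int) (out : List Int) :
    row.foldl pvAltElem (pvM p, out) =
      (pvM (p ++ row),
       out ++ row.map (fun x => pvIdxZ (PySem.Set.ofList (p ++ row)) x)) := by
  induction row generalizing p out with
  | nil => simp
  | cons x t ih =>
    have hassoc : p ++ x :: t = (p ++ [x]) ++ t := by simp
    by_cases hx : x ∈ p
    · obtain ⟨k, hk⟩ : ∃ k, PySem.List.index? (PySem.Set.ofList p) x = some k := by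
        cases h : PySem.List.index? (PySem.Set.ofList p) x with
        | none => exact absurd ((PySem.Set.mem_ofList _ _).mpr hx) ((PySem.List.index?_eq_none_iff _ _).mp h)
        | some k => exact ⟨k, rfl⟩
      have hk' : List.idxOf? x (PySem.Set.ofList p) = some k := by simpa using hk
      have hstep : pvAltElem (pvM p, out) x = (pvM (p ++ [x]), out ++ [(k : Int)]) := by
        simp [pvAltElem, pvM_get?, hk', pvM_snoc_mem p x hx]
      have hxval : pvIdxZ (PySem.Set.ofList (p ++ x :: t)) x = (k : Int) := by
        rw [hassoc, pvIdxZ_prefix _ t x (by simp), pvIdxZ,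
            pvIdx_prefix p [x] x hx, hk]
      rw [List.foldl_cons, hstep, ih (p ++ [x]) (out ++ [(k : Int)])]
      rw [← hassoc]
      simp [hxval]
    · have hnone : (pvM p).get? x = none := by
        rw [pvM_get?, (PySem.List.index?_eq_none_iff _ _).mpr
          (fun h => hx ((PySem.Set.mem_ofList _ _).mp h))]
      have hstep : pvAltElem (pvM p, out) x =
          (pvM (p ++ [x]), out ++ [((PySem.Set.ofList p).length : Int)]) := by
        simp [pvAltElem, hnone, pvM_size, pvM_snoc_not_mem p x hx]
      have hxval : pvIdxZ (PySem.Set.ofList (p ++ x :: t)) x = ((PySem.Set.ofList p).length : Int) := by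
        rw [hassoc, pvIdxZ_prefix _ t x (by simp), pvIdxZ]
        rw [PySem.Set.ofList_append_singleton,
            PySem.Set.add_of_not_mem (fun h => hx ((PySem.Set.mem_ofList _ _).mp h)),
            PySem.List.index?_append_singleton_self _ _
              (fun h => hx ((PySem.Set.mem_ofList _ _).mp h))]
      rw [List.foldl_cons, hstep, ih (p ++ [x]) _]
      rw [← hassoc]
      simp [hxval]

lemma pvOuter (cs : List (List Int)) (p : List Int) (outs : List (List Int)) :
    (cs.foldl
      (fun (acc : PySem.Dict Int Int × List (List Int)) row =>
        let r := row.foldl pvAltElem (acc.1, ([] : List Int))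
        (r.1, acc.2 ++ [r.2]))
      (pvM p, outs)).2 =
    outs ++ cs.map (fun row =>
      row.map (fun x => pvIdxZ (PySem.Set.ofList (p ++ cs.flatten)) x)) := by
  induction cs generalizing p outs with
  | nil => simp
  | cons row rest ih =>
    have hflat : p ++ (row :: rest).flatten = (p ++ row) ++ rest.flatten := by simp
    have hrw : row.map (fun x => pvIdxZ (PySem.Set.ofList ((p ++ row) ++ rest.flatten)) x)
        = row.map (fun x => pvIdxZ (PySem.Set.ofList (p ++ row)) x) :=
      List.map_congr_left (fun x hx =>
        pvIdxZ_prefix (p ++ row) rest.flatten x (by simp [hx]))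
    rw [List.foldl_cons]
    simp only [pvRow row p []]
    rw [ih (p ++ row), hflat, List.map_cons, hrw]
    simp

lemma pvA_eq (cs : List (List Int)) :
    compress_correspondences cs =
      cs.map (fun row => row.map (fun x => pvIdxZ (PySem.Set.ofList cs.flatten) x)) := by
  show cs.map (fun row => row.map (fun c => (pvM cs.flatten).getD c 0)) = _
  apply List.map_congr_left
  intro row hrow
  apply List.map_congr_left
  intro x hx
  have hxf : x ∈ cs.flatten := List.mem_flatten.mpr ⟨row, hrow, hx⟩
  obtain ⟨k, hk⟩ : ∃ k, PySem.List.index? (PySem.Set.ofList cs.flatten) x = some k := by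
    cases h : PySem.List.index? (PySem.Set.ofList cs.flatten) x with
    | none => exact absurd ((PySem.Set.mem_ofList _ _).mpr hxf) ((PySem.List.index?_eq_none_iff _ _).mp h)
    | some k => exact ⟨k, rfl⟩
  have hget := pvM_get? cs.flatten x
  rw [hk] at hget
  have hk' : List.idxOf? x (PySem.Set.ofList cs.flatten) = some k := by simpa using hk
  simp [PySem.Dict.getD, hget, pvIdxZ, hk']

-- ===== VERDICT (by name: the statement is the Claim_ definition above) =====
theorem compress_correspondences_spec : Claim_equal_compress_correspondences := by
  intro cs _
  unfold Spec_compress_correspondences compress_correspondences_alt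
  have h0 : (PySem.Dict.empty : PySem.Dict Int Int) = pvM [] := rfl
  rw [h0, pvOuter cs [] []]
  simpa using (pvA_eq cs)
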